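-- pv_equiv track=rewrite | github.com/manikantavasupalli/pyclass_2022 | tasks/generate_rank.py | update_ranksreport
-- ===== SOURCE A (Python) =====
-- def generate_ranksreport(lrank):
--     rdict ={}
--     rank = 1
--     for k in lrank:
--         if k not in rdict.keys():
--             rdict[k] = rank
--             rank += 1
--     return rdict
--
-- def update_ranksreport(lrank, rank):
--     isupdated = False
--     for r in range(len(lrank)):
--         if rank > lrank[r]:
--             lrank.insert(r,rank)
--             isupdated = True
--             break
--     if not isupdated:
--         lrank.append(rank)
--     urdict = generate_ranksreport(lrank)
--     return urdict
-- ===== SOURCE B (Python) =====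
-- # Single fused left-to-right pass: splice rank in and build the value->rank dict
-- # with a running counter at the same time (A makes two passes: index-scan insert,
-- # then a full rebuild of the dict). Mutates lrank in place like A (lrank[:] = new).
-- def update_ranksreport(lrank, rank):
--     new = []
--     rdict = {}
--     nxt = 1
--     inserted = False
--     for x in lrank:
--         if not inserted and rank > x:
--             new.append(rank)
--             if rank not in rdict:
--                 rdict[rank] = nxt
--                 nxt += 1
--             inserted = True
--         new.append(x)
--         if x not in rdict:
--             rdict[x] = nxt
--             nxt += 1
--     if not inserted:
--         new.append(rank)
--         if rank not in rdict:
--             rdict[rank] = nxt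
--             nxt += 1
--     lrank[:] = new
--     return rdict
-- ===== Notes on version B (the rewrite author's own statement) =====
-- stated objective: alternative
-- what changed: Replaces A's two-phase index-scan insert plus full dict rebuild by one fused left-to-right pass that splices rank in and assigns first-occurrence ids with a running counter.
import Mathlib
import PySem

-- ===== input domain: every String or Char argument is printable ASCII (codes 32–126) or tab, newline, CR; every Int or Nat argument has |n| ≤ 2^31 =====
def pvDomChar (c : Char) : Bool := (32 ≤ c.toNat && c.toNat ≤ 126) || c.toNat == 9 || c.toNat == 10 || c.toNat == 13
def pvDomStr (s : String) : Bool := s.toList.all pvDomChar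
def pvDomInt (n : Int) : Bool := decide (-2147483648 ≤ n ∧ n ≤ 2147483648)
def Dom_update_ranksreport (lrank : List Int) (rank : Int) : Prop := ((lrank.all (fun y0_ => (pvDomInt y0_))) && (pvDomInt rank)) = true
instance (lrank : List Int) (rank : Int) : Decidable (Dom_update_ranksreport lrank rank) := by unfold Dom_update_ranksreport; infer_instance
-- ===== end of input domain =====

-- Note: Python A mutates lrank in place; B performs the same mutation (lrank[:] = new).
-- The equivalence proved here is about the RETURN value (the dict, as an assoc list).

-- ===== PORT A =====
-- generate_ranksreport: one pass assigning the running counter to unseen keys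
def genRanksA (lrank : List Int) : PySem.Dict Int Int :=
  (lrank.foldl
    (fun (st : PySem.Dict Int Int × Int) k =>
      if st.1.contains k then st else (st.1.insert k st.2, st.2 + 1))
    (PySem.Dict.empty, 1)).1

-- the index loop with break: insert rank before the first element it exceeds, else append
def insertRankA (rank : Int) : List Int → List Int
  | [] => [rank]
  | x :: xs => if rank > x then rank :: x :: xs else x :: insertRankA rank xs

def update_ranksreport (lrank : List Int) (rank : Int) : List (Int × Int) :=
  (genRanksA (insertRankA rank lrank)).items

-- ===== PORT B =====
-- register k under the running counter if unseen
def regB (d : PySem.Dict Int Int) (c : Int) (k : Int) : PySem.Dict Int Int × Int :=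
  if d.contains k then (d, c) else (d.insert k c, c + 1)

-- the fused pass: state = (new list, dict, next id, inserted flag)
def altLoopB (rank : Int) : List Int → List Int → PySem.Dict Int Int → Int → Bool →
    List Int × PySem.Dict Int Int × Int × Bool
  | [], new, d, c, ins => (new, d, c, ins)
  | x :: xs, new, d, c, ins =>
    if !ins && rank > x then
      let r1 := regB d c rank
      let r2 := regB r1.1 r1.2 x
      altLoopB rank xs (new ++ [rank, x]) r2.1 r2.2 true
    else
      let r1 := regB d c x
      altLoopB rank xs (new ++ [x]) r1.1 r1.2 ins

def update_ranksreport_alt (lrank : List Int) (rank : Int) : List (Int × Int) :=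
  let r := altLoopB rank lrank [] PySem.Dict.empty 1 false
  if r.2.2.2 then r.2.1.items else (regB r.2.1 r.2.2.1 rank).1.items

-- ===== PRECONDITION & SPEC =====
def Spec_update_ranksreport (lrank : List Int) (rank : Int) (out : List (Int × Int)) : Prop := out = update_ranksreport_alt lrank rank
instance (lrank : List Int) (rank : Int) (out : List (Int × Int)) : Decidable (Spec_update_ranksreport lrank rank out) := by unfold Spec_update_ranksreport; infer_instance

-- ===== CLAIM (what is proved, stated in full; the proofs are below) =====
def Claim_equal_update_ranksreport : Prop := ∀ (lrank : List Int) (rank : Int), Dom_update_ranksreport lrank rank → Spec_update_ranksreport lrank rank (update_ranksreport lrank rank)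

-- ===== LEMMAS AND PROOFS =====

-- the step of A's dict-building fold
def gstep (st : PySem.Dict Int Int × Int) (k : Int) : PySem.Dict Int Int × Int :=
  if st.1.contains k then st else (st.1.insert k st.2, st.2 + 1)

theorem regB_eq_gstep (d : PySem.Dict Int Int) (c : Int) (k : Int) :
    regB d c k = gstep (d, c) k := rfl

theorem genRanksA_eq_foldl (l : List Int) :
    genRanksA l = (l.foldl gstep (PySem.Dict.empty, 1)).1 := rfl

-- once inserted, B processes the remaining list exactly like A's dict fold
theorem altLoopB_true (rank : Int) (xs : List Int) :
    ∀ (new : List Int) (d : PySem.Dict Int Int) (c : Int),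
      altLoopB rank xs new d c true =
        (new ++ xs, (xs.foldl gstep (d, c)).1, (xs.foldl gstep (d, c)).2, true) := by
  induction xs with
  | nil => intro new d c; simp [altLoopB]
  | cons x xs ih =>
    intro new d c
    simp only [altLoopB, Bool.not_true, Bool.false_and, List.foldl_cons]
    rw [ih (new ++ [x]) (regB d c x).1 (regB d c x).2]
    simp [regB_eq_gstep]

-- before insertion, B's final dict equals A's fold over the spliced list
theorem altLoopB_false (rank : Int) (xs : List Int) :
    ∀ (new : List Int) (d : PySem.Dict Int Int) (c : Int),
      (let r := altLoopB rank xs new d c false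
       if r.2.2.2 then r.2.1 else (regB r.2.1 r.2.2.1 rank).1) =
      ((insertRankA rank xs).foldl gstep (d, c)).1 := by
  induction xs with
  | nil =>
    intro new d c
    simp [altLoopB, insertRankA, regB_eq_gstep]
  | cons x xs ih =>
    intro new d c
    by_cases h : rank > x
    · simp only [altLoopB, insertRankA, h, Bool.not_false, Bool.true_and, if_true,
        decide_true, altLoopB_true, regB_eq_gstep, List.foldl_cons]
    · simp only [altLoopB, insertRankA, h, decide_false, Bool.not_false, Bool.true_and,
        if_false, List.foldl_cons]
      exact ih _ _ _

-- ===== VERDICT (by name: the statement is the Claim_ definition above) =====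
theorem update_ranksreport_spec : Claim_equal_update_ranksreport := by
  intro lrank rank _
  show update_ranksreport lrank rank = update_ranksreport_alt lrank rank
  unfold update_ranksreport update_ranksreport_alt
  rw [genRanksA_eq_foldl, ← altLoopB_false rank lrank [] PySem.Dict.empty 1]
  by_cases h : (altLoopB rank lrank [] PySem.Dict.empty 1 false).2.2.2 <;> simp [h]
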